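-- pv_equiv track=rewrite | github.com/annamarieweber/genSearch | gensearch/utils.py | census_years_for_lifespan
-- ===== SOURCE A (Python) =====
-- from typing import List, Optional
--
-- US_CENSUS_YEARS = list(range(1790, 1960, 10))  # 1790-1950
--
-- UK_CENSUS_YEARS = [1841, 1851, 1861, 1871, 1881, 1891, 1901, 1911, 1921]
--
-- def census_years_for_lifespan(
--     birth_year: int,
--     death_year: Optional[int] = None,
--     country: str = "US",
-- ) -> List[int]:
--     """Return census years a person would appear in during their lifetime."""
--     years = US_CENSUS_YEARS if country == "US" else UK_CENSUS_YEARS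
--     end = death_year or (birth_year + 85)
--     return [y for y in years if birth_year <= y <= end]
-- ===== SOURCE B (Python) =====
-- import bisect
--
-- US_CENSUS_YEARS = list(range(1790, 1960, 10))  # 1790-1950
--
-- UK_CENSUS_YEARS = [1841, 1851, 1861, 1871, 1881, 1891, 1901, 1911, 1921]
--
--
-- def census_years_for_lifespan(birth_year, death_year=None, country="US"):
--     """Return census years a person would appear in during their lifetime."""
--     years = US_CENSUS_YEARS if country == "US" else UK_CENSUS_YEARS
--     end = death_year or (birth_year + 85)
--     lo = bisect.bisect_left(years, birth_year)
--     hi = bisect.bisect_right(years, end)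
--     return years[lo:hi]
-- ===== Notes on version B (the rewrite author's own statement) =====
-- stated objective: alternative
-- what changed: Replaces the per-element linear filter comprehension with binary-search boundary location (bisect_left/bisect_right) on the sorted census list plus a single slice.
import Mathlib
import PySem

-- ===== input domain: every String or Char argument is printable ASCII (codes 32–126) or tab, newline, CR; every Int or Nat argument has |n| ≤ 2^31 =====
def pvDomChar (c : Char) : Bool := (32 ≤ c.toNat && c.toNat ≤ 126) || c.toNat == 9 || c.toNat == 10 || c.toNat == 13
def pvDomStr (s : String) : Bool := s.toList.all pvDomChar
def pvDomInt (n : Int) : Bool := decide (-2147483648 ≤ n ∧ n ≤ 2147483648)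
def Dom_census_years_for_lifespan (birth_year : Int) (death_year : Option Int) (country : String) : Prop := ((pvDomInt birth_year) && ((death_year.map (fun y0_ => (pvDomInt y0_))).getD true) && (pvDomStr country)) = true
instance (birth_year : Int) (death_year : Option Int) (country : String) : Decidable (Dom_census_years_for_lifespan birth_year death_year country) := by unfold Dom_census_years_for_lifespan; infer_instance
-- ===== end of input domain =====

-- B replaces the linear filter with bisect boundary search + slice (alternative decomposition).
-- ===== PORT A =====
def pvUS : List Int := [1790, 1800, 1810, 1820, 1830, 1840, 1850, 1860, 1870, 1880, 1890, 1900, 1910, 1920, 1930, 1940, 1950]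
def pvUK : List Int := [1841, 1851, 1861, 1871, 1881, 1891, 1901, 1911, 1921]

-- Python truthiness of `death_year or (birth_year + 85)`: None and 0 fall back.
def pvEnd (birth_year : Int) (death_year : Option Int) : Int :=
  match death_year with
  | some d => if d != 0 then d else birth_year + 85
  | none => birth_year + 85

def census_years_for_lifespan (birth_year : Int) (death_year : Option Int) (country : String) : List Int :=
  let years := if country == "US" then pvUS else pvUK
  let e := pvEnd birth_year death_year
  years.filter (fun y => decide (birth_year ≤ y) && decide (y ≤ e))

-- ===== PORT B =====
-- bisect.bisect_left / bisect_right on a sorted list, ported as the Lean/Mathlib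
-- characterisation of their results (count of elements strictly below / not above x).
def pvBisectLeft (l : List Int) (x : Int) : Int := (l.countP (fun y => decide (y < x)) : Nat)
def pvBisectRight (l : List Int) (x : Int) : Int := (l.countP (fun y => decide (y ≤ x)) : Nat)

def census_years_for_lifespan_alt (birth_year : Int) (death_year : Option Int) (country : String) : List Int :=
  let years := if country == "US" then pvUS else pvUK
  let e := pvEnd birth_year death_year
  let lo := pvBisectLeft years birth_year
  let hi := pvBisectRight years e
  PySem.List.slice years (some lo) (some hi)

-- ===== PRECONDITION & SPEC =====
def Spec_census_years_for_lifespan (birth_year : Int) (death_year : Option Int) (country : String) (out : List Int) : Prop := out = census_years_for_lifespan_alt birth_year death_year country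
instance (birth_year : Int) (death_year : Option Int) (country : String) (out : List Int) : Decidable (Spec_census_years_for_lifespan birth_year death_year country out) := by unfold Spec_census_years_for_lifespan; infer_instance

-- ===== CLAIM (what is proved, stated in full; the proofs are below) =====
def Claim_equal_census_years_for_lifespan : Prop := ∀ (birth_year : Int) (death_year : Option Int) (country : String), Dom_census_years_for_lifespan birth_year death_year country → Spec_census_years_for_lifespan birth_year death_year country (census_years_for_lifespan birth_year death_year country)

-- ===== LEMMAS AND PROOFS =====
lemma countP_zero_of_le {l : List Int} {x b : Int} (hb : b ≤ x) (hx : ∀ y ∈ l, x ≤ y) :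
    l.countP (fun y => decide (y < b)) = 0 := by
  rw [List.countP_eq_zero]
  intro y hy
  simp only [decide_eq_true_eq, not_lt]
  exact le_trans hb (hx y hy)

lemma countP_zero_of_gt {l : List Int} {x e : Int} (he : e < x) (hx : ∀ y ∈ l, x ≤ y) :
    l.countP (fun y => decide (y ≤ e)) = 0 := by
  rw [List.countP_eq_zero]
  intro y hy
  simp only [decide_eq_true_eq, not_le]
  exact lt_of_lt_of_le he (hx y hy)

lemma filter_nil_of_gt {l : List Int} {x b e : Int} (he : e < x) (hx : ∀ y ∈ l, x ≤ y) :
    l.filter (fun y => decide (b ≤ y) && decide (y ≤ e)) = [] := by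
  rw [List.filter_eq_nil_iff]
  intro y hy
  simp only [Bool.and_eq_true, decide_eq_true_eq, not_and, not_le]
  intro _
  exact lt_of_lt_of_le he (hx y hy)

lemma sorted_drop_take_filter (l : List Int) (hs : l.Pairwise (· ≤ ·)) (b e : Int) :
    (l.drop (l.countP (fun y => decide (y < b)))).take
        (l.countP (fun y => decide (y ≤ e)) - l.countP (fun y => decide (y < b))) =
      l.filter (fun y => decide (b ≤ y) && decide (y ≤ e)) := by
  induction l with
  | nil => simp
  | cons x t ih =>
    rcases List.pairwise_cons.mp hs with ⟨hx, ht⟩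
    have hx' : ∀ y ∈ x :: t, x ≤ y := by
      intro y hy
      rcases List.mem_cons.mp hy with h | h
      · omega
      · exact hx y h
    have IH := ih ht
    by_cases hb : b ≤ x
    · by_cases he : x ≤ e
      · have hlo : (x :: t).countP (fun y => decide (y < b)) = 0 := countP_zero_of_le hb hx'
        have hlot : t.countP (fun y => decide (y < b)) = 0 := countP_zero_of_le hb hx
        rw [hlo, List.countP_cons, List.filter_cons]
        simp only [hb, he, decide_true, Bool.and_self, if_true, List.drop_zero, Nat.sub_zero]
        rw [List.take_succ_cons]
        rw [hlot, List.drop_zero, Nat.sub_zero] at IH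
        rw [IH]
      · rw [countP_zero_of_gt (show e < x by omega) hx', filter_nil_of_gt (show e < x by omega) hx']
        simp
    · rw [List.countP_cons, List.countP_cons, List.filter_cons]
      simp only [show decide (x < b) = true by simp; omega,
        show (decide (b ≤ x) && decide (x ≤ e)) = false by simp; omega]
      by_cases he : x ≤ e
      · simp only [he, decide_true, if_true]
        rw [List.drop_succ_cons,
          show t.countP (fun y => decide (y ≤ e)) + 1 - (t.countP (fun y => decide (y < b)) + 1)
            = t.countP (fun y => decide (y ≤ e)) - t.countP (fun y => decide (y < b)) from by omega,
          IH]
        simp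
      · have h0 : t.countP (fun y => decide (y ≤ e)) = 0 := countP_zero_of_gt (by omega) hx
        simp only [he, decide_false, h0]
        rw [filter_nil_of_gt (show e < x by omega) hx]
        simp

lemma sortedUS : pvUS.Pairwise (· ≤ ·) := by decide
lemma sortedUK : pvUK.Pairwise (· ≤ ·) := by decide

-- ===== VERDICT (by name: the statement is the Claim_ definition above) =====
theorem census_years_for_lifespan_spec : Claim_equal_census_years_for_lifespan := by
  intro birth_year death_year country _
  unfold Spec_census_years_for_lifespan census_years_for_lifespan census_years_for_lifespan_alt
  simp only [pvBisectLeft, pvBisectRight]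
  rw [PySem.List.slice_natCast]
  by_cases hc : country == "US"
  · simp only [if_pos hc]
    rw [sorted_drop_take_filter pvUS sortedUS]
  · simp only [if_neg hc]
    rw [sorted_drop_take_filter pvUK sortedUK]
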